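-- pv_equiv track=rewrite | github.com/DgnSid/Test-de-Personnalit- | diag.py | parse_responses
-- ===== SOURCE A (Python) =====
-- from typing import Dict, List
--
-- def parse_responses(json_data: Dict[int, int]) -> Dict[str, Dict[int, int]]:
--     """
--     Convertit les réponses JSON plates en structure par blocs.
--     """
--     responses = {
--         "bloc1": {},
--         "bloc2": {},
--         "bloc3": {},
--         "bloc4": {}
--     }
--
--     for i in range(1, 31):
--         if i in json_data:
--             responses["bloc1"][i] = json_data[i]
--
--     for i in range(31, 47):
--         if i in json_data:
--             responses["bloc2"][i - 30] = json_data[i]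
--
--     for i in range(47, 59):
--         if i in json_data:
--             responses["bloc3"][i - 46] = json_data[i]
--
--     for i in range(59, 73):
--         if i in json_data:
--             responses["bloc4"][i - 58] = json_data[i]
--
--     return responses
-- ===== SOURCE B (Python) =====
-- from typing import Dict
--
--
-- def parse_responses(json_data: Dict[int, int]) -> Dict[str, Dict[int, int]]:
--     """
--     Convertit les réponses JSON plates en structure par blocs.
--     Data-driven: sort the keys actually present and dispatch each through a
--     bounds table (first matching block wins), instead of probing all 72
--     candidate question numbers against the dict.
--     """
--     blocks = [(1, 30, {}), (31, 46, {}), (47, 58, {}), (59, 72, {})]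
--     for k in sorted(json_data):
--         for lo, hi, d in blocks:
--             if lo <= k <= hi:
--                 d[k - lo + 1] = json_data[k]
--                 break
--     return {name: d for name, (_, _, d) in
--             zip(["bloc1", "bloc2", "bloc3", "bloc4"], blocks)}
-- ===== Notes on version B (the rewrite author's own statement) =====
-- stated objective: alternative
-- what changed: A probes all 72 candidate question numbers against the dict in four fixed-range scans; B sorts the keys actually present and makes one pass over them, dispatching each key through a (lo, hi, dict) bounds table with first-match-wins.
import Mathlib
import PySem

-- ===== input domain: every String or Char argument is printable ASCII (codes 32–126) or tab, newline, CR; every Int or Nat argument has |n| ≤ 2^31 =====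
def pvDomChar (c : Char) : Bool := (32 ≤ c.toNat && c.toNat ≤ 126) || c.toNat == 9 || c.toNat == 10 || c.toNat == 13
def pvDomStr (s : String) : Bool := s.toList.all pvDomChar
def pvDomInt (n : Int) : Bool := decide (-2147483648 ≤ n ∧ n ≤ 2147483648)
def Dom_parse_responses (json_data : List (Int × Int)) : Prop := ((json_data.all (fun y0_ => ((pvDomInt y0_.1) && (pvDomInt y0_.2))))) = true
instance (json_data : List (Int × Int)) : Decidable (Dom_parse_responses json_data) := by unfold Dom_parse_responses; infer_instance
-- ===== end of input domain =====

-- B replaces A's four fixed-range probe loops by one pass over the sorted present keys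
-- dispatched through a bounds table; same return value.

-- ===== PORT A =====
-- loop body of A's per-block scan: "if i in json_data: responses[bloc][i - off] = json_data[i]"
def pvAStep1 (jd : PySem.Dict Int Int) (d : PySem.Dict Int Int) (i : Int) : PySem.Dict Int Int :=
  match jd.get? i with
  | some v => d.insert i v
  | none => d

def pvAStep2 (jd : PySem.Dict Int Int) (d : PySem.Dict Int Int) (i : Int) : PySem.Dict Int Int :=
  match jd.get? i with
  | some v => d.insert (i - 30) v
  | none => d

def pvAStep3 (jd : PySem.Dict Int Int) (d : PySem.Dict Int Int) (i : Int) : PySem.Dict Int Int :=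
  match jd.get? i with
  | some v => d.insert (i - 46) v
  | none => d

def pvAStep4 (jd : PySem.Dict Int Int) (d : PySem.Dict Int Int) (i : Int) : PySem.Dict Int Int :=
  match jd.get? i with
  | some v => d.insert (i - 58) v
  | none => d

def parse_responses (json_data : List (Int × Int)) : List (String × List (Int × Int)) :=
  [("bloc1", ((PySem.List.pyRange 1 31 1).foldl (pvAStep1 (PySem.Dict.ofList json_data)) PySem.Dict.empty).items),
   ("bloc2", ((PySem.List.pyRange 31 47 1).foldl (pvAStep2 (PySem.Dict.ofList json_data)) PySem.Dict.empty).items),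
   ("bloc3", ((PySem.List.pyRange 47 59 1).foldl (pvAStep3 (PySem.Dict.ofList json_data)) PySem.Dict.empty).items),
   ("bloc4", ((PySem.List.pyRange 59 73 1).foldl (pvAStep4 (PySem.Dict.ofList json_data)) PySem.Dict.empty).items)]

-- ===== PORT B =====
-- inner loop "for lo, hi, d in blocks: if lo <= k <= hi: d[k - lo + 1] = json_data[k]; break":
-- scan the table, update the first matching block in place, leave the rest untouched
def pvPlace (k v : Int) : List (Int × Int × PySem.Dict Int Int) → List (Int × Int × PySem.Dict Int Int)
  | [] => []
  | (lo, hi, d) :: rest =>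
    if lo ≤ k ∧ k ≤ hi then (lo, hi, d.insert (k - lo + 1) v) :: rest
    else (lo, hi, d) :: pvPlace k v rest

-- "blocks = [(1,30,{}),…]; for k in sorted(json_data): <inner loop>"
def pvBBlocks (json_data : List (Int × Int)) : List (Int × Int × PySem.Dict Int Int) :=
  (PySem.List.sorted (PySem.Dict.ofList json_data).keys (fun x => x) false).foldl
    (fun bs k =>
      match (PySem.Dict.ofList json_data).get? k with
      -- json_data[k]: k is drawn from the dict's own keys, so the lookup always succeeds
      | some v => pvPlace k v bs
      | none => bs)
    [(1, 30, PySem.Dict.empty), (31, 46, PySem.Dict.empty),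
     (47, 58, PySem.Dict.empty), (59, 72, PySem.Dict.empty)]

def parse_responses_alt (json_data : List (Int × Int)) : List (String × List (Int × Int)) :=
  (List.zip ["bloc1", "bloc2", "bloc3", "bloc4"] (pvBBlocks json_data)).map
    (fun p => (p.1, p.2.2.2.items))

-- ===== PRECONDITION & SPEC =====
def Spec_parse_responses (json_data : List (Int × Int)) (out : List (String × List (Int × Int))) : Prop := out = parse_responses_alt json_data
instance (json_data : List (Int × Int)) (out : List (String × List (Int × Int))) : Decidable (Spec_parse_responses json_data out) := by unfold Spec_parse_responses; infer_instance

-- ===== CLAIM (what is proved, stated in full; the proofs are below) =====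
def Claim_equal_parse_responses : Prop := ∀ (json_data : List (Int × Int)), Dom_parse_responses json_data → Spec_parse_responses json_data (parse_responses json_data)

-- ===== LEMMAS AND PROOFS =====
-- uniform per-block step used as the common normal form of both programs' loop bodies
def pvT (jd : PySem.Dict Int Int) (lo hi : Int) (d : PySem.Dict Int Int) (k : Int) : PySem.Dict Int Int :=
  if jd.contains k ∧ lo ≤ k ∧ k ≤ hi then d.insert (k - lo + 1) (jd.getD k 0) else d

-- B's fold splits into four independent per-block folds
lemma pvFoldInv (jd : PySem.Dict Int Int) (l : List Int) :
    ∀ a b c d : PySem.Dict Int Int,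
    l.foldl (fun bs k => match jd.get? k with | some v => pvPlace k v bs | none => bs)
      [(1, 30, a), (31, 46, b), (47, 58, c), (59, 72, d)] =
    [(1, 30, l.foldl (pvT jd 1 30) a), (31, 46, l.foldl (pvT jd 31 46) b),
     (47, 58, l.foldl (pvT jd 47 58) c), (59, 72, l.foldl (pvT jd 59 72) d)] := by
  induction l with
  | nil => intro a b c d; rfl
  | cons k t ih =>
    intro a b c d
    simp only [List.foldl_cons]
    have hc : jd.contains k = (jd.get? k).isSome := PySem.Dict.contains_eq_isSome_get? ..
    cases h : jd.get? k with
    | none =>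
      have hT : ∀ lo hi x, pvT jd lo hi x k = x := by
        intro lo hi x; unfold pvT; rw [hc, h]; simp
      rw [hT, hT, hT, hT, ih]
    | some v =>
      have hv : jd.getD k 0 = v := by
        rw [PySem.Dict.getD_eq_get?_getD, h]; rfl
      have hT : ∀ lo hi x, pvT jd lo hi x k =
          if lo ≤ k ∧ k ≤ hi then x.insert (k - lo + 1) v else x := by
        intro lo hi x; unfold pvT; rw [hc, h, hv]; simp
      by_cases h1 : (1 : Int) ≤ k ∧ k ≤ 30
      · simp only [pvPlace, if_pos h1, ih, hT,
          if_neg (by omega : ¬((31:Int) ≤ k ∧ k ≤ 46)),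
          if_neg (by omega : ¬((47:Int) ≤ k ∧ k ≤ 58)),
          if_neg (by omega : ¬((59:Int) ≤ k ∧ k ≤ 72))]
      · by_cases h2 : (31 : Int) ≤ k ∧ k ≤ 46
        · simp only [pvPlace, if_neg h1, if_pos h2, ih, hT,
            if_neg (by omega : ¬((47:Int) ≤ k ∧ k ≤ 58)),
            if_neg (by omega : ¬((59:Int) ≤ k ∧ k ≤ 72))]
        · by_cases h3 : (47 : Int) ≤ k ∧ k ≤ 58
          · simp only [pvPlace, if_neg h1, if_neg h2, if_pos h3, ih, hT,
              if_neg (by omega : ¬((59:Int) ≤ k ∧ k ≤ 72))]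
          · by_cases h4 : (59 : Int) ≤ k ∧ k ≤ 72
            · simp only [pvPlace, if_neg h1, if_neg h2, if_neg h3, if_pos h4, ih, hT]
            · simp only [pvPlace, if_neg h1, if_neg h2, if_neg h3, if_neg h4, ih, hT]

-- two strictly increasing integer lists with the same members are equal
lemma pvStrictExt : ∀ (l1 l2 : List Int), l1.Pairwise (· < ·) → l2.Pairwise (· < ·) →
    (∀ x, x ∈ l1 ↔ x ∈ l2) → l1 = l2 := by
  intro l1
  induction l1 with
  | nil =>
    intro l2 _ _ hm
    exact (List.eq_nil_iff_forall_not_mem.mpr (fun x hx => by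
      exact absurd ((hm x).mpr hx) (List.not_mem_nil))).symm
  | cons a t ih =>
    intro l2 h1 h2 hm
    cases l2 with
    | nil => exact absurd ((hm a).mp (List.mem_cons_self ..)) (List.not_mem_nil)
    | cons b t2 =>
      have hab : a = b := by
        have ha : a ∈ b :: t2 := (hm a).mp (List.mem_cons_self ..)
        have hb : b ∈ a :: t := (hm b).mpr (List.mem_cons_self ..)
        rcases List.mem_cons.mp ha with h | h
        · exact h
        · rcases List.mem_cons.mp hb with h' | h'
          · exact h'.symm
          · have := (List.pairwise_cons.mp h2).1 a h
            have := (List.pairwise_cons.mp h1).1 b h'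
            omega
      subst hab
      have htm : ∀ x, x ∈ t ↔ x ∈ t2 := by
        intro x
        constructor
        · intro hx
          have hax := (List.pairwise_cons.mp h1).1 x hx
          rcases List.mem_cons.mp ((hm x).mp (List.mem_cons_of_mem _ hx)) with h | h
          · omega
          · exact h
        · intro hx
          have hax := (List.pairwise_cons.mp h2).1 x hx
          rcases List.mem_cons.mp ((hm x).mpr (List.mem_cons_of_mem _ hx)) with h | h
          · omega
          · exact h
      rw [ih t2 (List.pairwise_cons.mp h1).2 (List.pairwise_cons.mp h2).2 htm]

-- the sorted key list of a dict is strictly increasing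
lemma pvSortedKeysStrict (jd : PySem.Dict Int Int) (h : jd.keys.Nodup) :
    (PySem.List.sorted jd.keys (fun x => x) false).Pairwise (· < ·) := by
  have hperm := PySem.List.sorted_perm jd.keys (fun x : Int => x) false
  have hnd : (PySem.List.sorted jd.keys (fun x => x) false).Nodup := hperm.nodup_iff.mpr h
  have hle : (PySem.List.sorted jd.keys (fun x => x) false).Pairwise (fun a b => a ≤ b) :=
    PySem.List.sorted_pairwise ..
  exact (hle.and hnd).imp (fun h => lt_of_le_of_ne h.1 h.2)

-- a per-block fold over the candidate range equals the same fold over the sorted present keys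
lemma pvBlockEq (jd : PySem.Dict Int Int) (hnd : jd.keys.Nodup) (lo hi hib : Int)
    (hb : hib = hi + 1)
    (hpw : (PySem.List.pyRange lo hib 1).Pairwise (· < ·)) :
    (PySem.List.pyRange lo hib 1).foldl (pvT jd lo hi) PySem.Dict.empty =
    (PySem.List.sorted jd.keys (fun x => x) false).foldl (pvT jd lo hi) PySem.Dict.empty := by
  subst hb
  have hfil :
      (PySem.List.pyRange lo (hi + 1) 1).filter
        (fun k => decide (jd.contains k ∧ lo ≤ k ∧ k ≤ hi)) =
      (PySem.List.sorted jd.keys (fun x => x) false).filter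
        (fun k => decide (jd.contains k ∧ lo ≤ k ∧ k ≤ hi)) := by
    apply pvStrictExt
    · exact hpw.sublist (List.filter_sublist)
    · exact (pvSortedKeysStrict jd hnd).sublist (List.filter_sublist)
    · intro x
      simp only [List.mem_filter, PySem.List.mem_pyRange_one, PySem.List.mem_sorted,
        decide_eq_true_eq]
      constructor
      · rintro ⟨hr, hq⟩
        exact ⟨(PySem.Dict.contains_iff_mem_keys ..).mp hq.1, hq⟩
      · rintro ⟨hmem, hq⟩
        exact ⟨⟨hq.2.1, by omega⟩, hq⟩
  unfold pvT
  rw [PySem.List.foldl_ite_eq_foldl_filter, hfil, ← PySem.List.foldl_ite_eq_foldl_filter]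

-- A's per-block loop body equals the uniform step on its own range
lemma pvAStepsEq (jd : PySem.Dict Int Int) :
    (∀ (acc : PySem.Dict Int Int) i, i ∈ PySem.List.pyRange 1 31 1 → pvAStep1 jd acc i = pvT jd 1 30 acc i) ∧
    (∀ (acc : PySem.Dict Int Int) i, i ∈ PySem.List.pyRange 31 47 1 → pvAStep2 jd acc i = pvT jd 31 46 acc i) ∧
    (∀ (acc : PySem.Dict Int Int) i, i ∈ PySem.List.pyRange 47 59 1 → pvAStep3 jd acc i = pvT jd 47 58 acc i) ∧
    (∀ (acc : PySem.Dict Int Int) i, i ∈ PySem.List.pyRange 59 73 1 → pvAStep4 jd acc i = pvT jd 59 72 acc i) := by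
  refine ⟨?_, ?_, ?_, ?_⟩ <;>
  · intro acc i hi
    have hr := (PySem.List.mem_pyRange_one).mp hi
    simp only [pvAStep1, pvAStep2, pvAStep3, pvAStep4, pvT]
    rw [PySem.Dict.contains_eq_isSome_get?]
    cases h : jd.get? i with
    | none => simp
    | some v =>
      rw [PySem.Dict.getD_eq_get?_getD, h]
      simp only [Option.isSome_some, Option.getD_some]
      rw [if_pos ⟨trivial, by omega, by omega⟩]
      congr 1
      omega

-- ===== VERDICT (by name: the statement is the Claim_ definition above) =====
theorem parse_responses_spec : Claim_equal_parse_responses := by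
  intro json_data _
  unfold Spec_parse_responses parse_responses parse_responses_alt pvBBlocks
  rw [pvFoldInv]
  have hnd : (PySem.Dict.ofList json_data).keys.Nodup := PySem.Dict.nodup_keys_ofList json_data
  obtain ⟨h1, h2, h3, h4⟩ := pvAStepsEq (PySem.Dict.ofList json_data)
  rw [PySem.List.foldl_congr_mem _ _ _ _ h1, PySem.List.foldl_congr_mem _ _ _ _ h2,
      PySem.List.foldl_congr_mem _ _ _ _ h3, PySem.List.foldl_congr_mem _ _ _ _ h4]
  rw [pvBlockEq _ hnd 1 30 31 (by norm_num) (by decide),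
      pvBlockEq _ hnd 31 46 47 (by norm_num) (by decide),
      pvBlockEq _ hnd 47 58 59 (by norm_num) (by decide),
      pvBlockEq _ hnd 59 72 73 (by norm_num) (by decide)]
  rfl
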